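-- pv_equiv track=rewrite | github.com/Agentscreech/advent20 | day11/day11.py | left
-- ===== SOURCE A (Python) =====
-- from typing import List, Tuple
--
-- def left(x:int, y:int, grid:List) -> bool:
--     #x -y
--     while y > 0:
--         y -= 1
--         if grid[x][y] == "#":
--             return True
--         if grid[x][y] == "L":
--             return False
--     return False
-- ===== SOURCE B (Python) =====
-- def left(x, y, grid):
--     if y <= 0:
--         return False
--     last = ''
--     for c in grid[x][:y]:
--         if c == '#' or c == 'L':
--             last = c
--     return last == '#'
-- ===== Notes on version B (the rewrite author's own statement) =====
-- stated objective: simpler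
-- what changed: Replaces A's backward short-circuiting while-loop over indices with a forward pass over the slice grid[x][:y] that keeps the last seat character seen and compares it to '#'.
import Mathlib
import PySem

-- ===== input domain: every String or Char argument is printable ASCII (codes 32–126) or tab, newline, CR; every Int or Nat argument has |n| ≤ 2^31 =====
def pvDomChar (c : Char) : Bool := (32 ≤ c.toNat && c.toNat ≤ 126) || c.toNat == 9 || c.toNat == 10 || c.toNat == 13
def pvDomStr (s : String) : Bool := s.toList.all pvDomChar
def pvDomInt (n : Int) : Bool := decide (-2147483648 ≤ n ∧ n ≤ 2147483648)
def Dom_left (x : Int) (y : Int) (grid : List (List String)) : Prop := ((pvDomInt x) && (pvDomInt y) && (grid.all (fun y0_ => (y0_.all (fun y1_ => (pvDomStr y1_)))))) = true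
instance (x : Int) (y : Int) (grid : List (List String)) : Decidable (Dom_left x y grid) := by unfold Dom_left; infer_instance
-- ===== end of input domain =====

-- B replaces A's backward short-circuiting scan with a forward pass over the prefix grid[x][:y] keeping the last seat seen (objective: simpler).


-- ===== PORT A =====
def leftGo (x : Int) (grid : List (List String)) (y : Int) : Bool :=
  if 0 < y then
    match (PySem.List.pyGet? grid x).bind (fun row => PySem.List.pyGet? row (y - 1)) with
    | none => false   -- IndexError in Python; outside Pre_left
    | some c =>
      if c == "#" then true
      else if c == "L" then false
      else leftGo x grid (y - 1)
  else false
termination_by y.toNat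
decreasing_by omega

def left (x : Int) (y : Int) (grid : List (List String)) : Bool := leftGo x grid y

-- ===== PORT B =====
def left_alt (x : Int) (y : Int) (grid : List (List String)) : Bool :=
  if y ≤ 0 then false
  else
    let row := (PySem.List.pyGet? grid x).getD []   -- B raises on bad x in Python (outside Pre_left)
    let pre := PySem.List.slice row none (some y)
    let last := pre.foldl (fun acc c => if c == "#" || c == "L" then c else acc) ""
    last == "#"

-- ===== PRECONDITION & SPEC =====
-- Pre_left excludes exactly the inputs where Python A raises IndexError: y > 0 with x out of
-- range for grid, or y exceeding the length of row grid[x] (A indexes grid[x][y-1] first).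
def Pre_left (x : Int) (y : Int) (grid : List (List String)) : Prop :=
  y ≤ 0 ∨ (PySem.Raise.InRange grid.length x ∧
           ∀ row ∈ (PySem.List.pyGet? grid x).toList, y ≤ (row.length : Int))
instance (x : Int) (y : Int) (grid : List (List String)) : Decidable (Pre_left x y grid) := by
  unfold Pre_left; infer_instance

def pvWitness_left : Int × Int × List (List String) := (0, 2, [[".", "#", "L"]])

def Spec_left (x : Int) (y : Int) (grid : List (List String)) (out : Bool) : Prop := out = left_alt x y grid
instance (x : Int) (y : Int) (grid : List (List String)) (out : Bool) : Decidable (Spec_left x y grid out) := by unfold Spec_left; infer_instance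

-- ===== CLAIM (what is proved, stated in full; the proofs are below) =====
def Claim_equal_left : Prop := ∀ (x : Int) (y : Int) (grid : List (List String)), Dom_left x y grid → Pre_left x y grid → Spec_left x y grid (left x y grid)

-- ===== LEMMAS AND PROOFS =====

lemma leftGo_eq_fold (x : Int) (grid : List (List String)) (row : List String)
    (hx : PySem.List.pyGet? grid x = some row) :
    ∀ (n : Nat), n ≤ row.length →
      leftGo x grid (n : Int)
        = ((row.take n).foldl (fun acc c => if c == "#" || c == "L" then c else acc) "" == "#") := by
  intro n
  induction n with
  | zero => intro _; rw [leftGo]; simp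
  | succ m ih =>
    intro hle
    have hm : m < row.length := by omega
    rw [leftGo]
    have h0 : (0 : Int) < ((m + 1 : Nat) : Int) := by exact_mod_cast Nat.succ_pos m
    have h1 : ((m + 1 : Nat) : Int) - 1 = (m : Int) := by push_cast; ring
    rw [if_pos h0, h1, hx]
    simp only [Option.bind_some]
    rw [PySem.List.pyGet?_natCast, List.getElem?_eq_getElem hm]
    have htake : row.take (m + 1) = row.take m ++ [row[m]] := by
      rw [List.take_succ, List.getElem?_eq_getElem hm]; rfl
    rw [htake, List.foldl_append]
    simp only [List.foldl_cons, List.foldl_nil]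
    by_cases hsharp : row[m] == "#"
    · rw [if_pos hsharp]
      have hb : (row[m] == "#" || row[m] == "L") = true := by simp [hsharp]
      rw [hb, if_pos rfl]
      have : row[m] = "#" := by simpa using hsharp
      rw [this]; decide
    · rw [if_neg hsharp]
      by_cases hL : row[m] == "L"
      · rw [if_pos hL]
        have hb : (row[m] == "#" || row[m] == "L") = true := by simp [hL]
        rw [hb, if_pos rfl]
        have : row[m] = "L" := by simpa using hL
        rw [this]; decide
      · rw [if_neg hL]
        have hb : (row[m] == "#" || row[m] == "L") = false := by simp [hsharp, hL]
        rw [hb]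
        simp only [Bool.false_eq_true, if_false]
        exact ih (by omega)

-- ===== VERDICT (by name: the statement is the Claim_ definition above) =====
theorem left_spec : Claim_equal_left := by
  intro x y grid _ hpre
  unfold Spec_left left left_alt
  by_cases hy : y ≤ 0
  · rw [leftGo, if_neg (by omega), if_pos hy]
  · rcases hpre with h | ⟨hin, hrow⟩
    · omega
    · obtain ⟨row, hx⟩ : ∃ row, PySem.List.pyGet? grid x = some row := by
        rcases h : PySem.List.pyGet? grid x with _ | row
        · exact absurd hin ((PySem.List.pyGet?_eq_none_iff _ _).mp h)
        · exact ⟨row, rfl⟩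
      have hylen : y ≤ (row.length : Int) := hrow row (by simp [hx])
      have hyy : y = ((y.toNat : Nat) : Int) := by omega
      rw [if_neg hy, hx]
      simp only [Option.getD_some]
      rw [hyy, PySem.List.slice_to_natCast, leftGo_eq_fold x grid row hx y.toNat (by omega)]
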